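-- pv_equiv track=rewrite | github.com/Oddlybird/Dancestry | GRUBGEN.py | bloodsort
-- ===== SOURCE A (Python) =====
-- def bloodsort(blood): #trolldeets.  Put in a group of letters.
--  a = 0   #count the number of letters stripped out
--  sorted = "" # sorted blood code
--  for arb in blood: #for each letter...
--   if arb == "R":
--    sorted = sorted + "R"
--    a = a + 1
--   if a == len(blood):
--    break
--  for arb in blood: #for each letter...
--   if arb == "G":
--    sorted = sorted + "G"
--    a = a + 1
--   if a == len(blood):
--    break
--  for arb in blood: #for each letter...
--   if arb == "B":
--    sorted = sorted + "B"
--    a = a + 1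
--   if a == len(blood):
--    break
--  for arb in blood: #for each letter...
--   if arb == "r":
--    sorted = sorted + "r"
--    a = a + 1
--   if a == len(blood):
--    break
--  for arb in blood: #for each letter...
--   if arb == "g":
--    sorted = sorted + "g"
--    a = a + 1
--   if a == len(blood):
--    break
--  for arb in blood: #for each letter...
--   if arb == "b":
--    sorted = sorted + "b"
--    a = a + 1
--   if a == len(blood):
--    break
--  return sorted
-- ===== SOURCE B (Python) =====
-- def bloodsort(blood):
--     counts = {}
--     for ch in blood:
--         counts[ch] = counts.get(ch, 0) + 1
--     return ''.join(ch * counts.get(ch, 0) for ch in "RGBrgb")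
-- ===== Notes on version B (the rewrite author's own statement) =====
-- stated objective: faster
-- what changed: Replaces A's six separate scans of blood (with a stripped-letter counter and early-break logic) by one frequency-table dict pass over blood followed by a single emit pass over the fixed priority letters, joining repeated letters at once.
import Mathlib
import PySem

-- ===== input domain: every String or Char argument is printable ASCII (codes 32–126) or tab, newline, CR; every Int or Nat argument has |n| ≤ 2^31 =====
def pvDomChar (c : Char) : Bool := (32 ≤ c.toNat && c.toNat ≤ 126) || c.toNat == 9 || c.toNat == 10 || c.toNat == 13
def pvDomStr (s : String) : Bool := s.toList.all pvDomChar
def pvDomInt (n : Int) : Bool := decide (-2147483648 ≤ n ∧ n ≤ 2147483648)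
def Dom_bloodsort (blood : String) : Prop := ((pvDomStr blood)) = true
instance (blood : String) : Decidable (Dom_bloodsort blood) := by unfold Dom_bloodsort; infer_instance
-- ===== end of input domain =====

-- B replaces A's six scans of blood by one frequency-table pass plus an emit pass over the fixed priority letters (measured faster in a timing run).

-- ===== PORT A =====
-- one of A's six 'for arb in blood' loops: append matches of t to sorted, count
-- them in a, and break as soon as a == len(blood)
def bsLoop (t : Char) (cs : List Char) (n : Nat) (a : Nat) (s : List Char) :
    Nat × List Char :=
  match cs with
  | [] => (a, s)
  | c :: rest =>
    let p := if c == t then (a + 1, s ++ [c]) else (a, s)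
    if p.1 == n then p else bsLoop t rest n p.1 p.2

def bloodsort (blood : String) : String :=
  let cs := blood.toList
  let n := cs.length
  let p := bsLoop 'R' cs n 0 []
  let p := bsLoop 'G' cs n p.1 p.2
  let p := bsLoop 'B' cs n p.1 p.2
  let p := bsLoop 'r' cs n p.1 p.2
  let p := bsLoop 'g' cs n p.1 p.2
  let p := bsLoop 'b' cs n p.1 p.2
  String.mk p.2

-- ===== PORT B =====
def bloodsort_alt (blood : String) : String :=
  let counts := blood.toList.foldl
    (fun d ch => d.insert ch (d.getD ch 0 + 1)) (PySem.Dict.empty : PySem.Dict Char Int)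
  String.mk (("RGBrgb".toList).flatMap (fun ch => PySem.List.pyRepeat [ch] (counts.getD ch 0)))

-- ===== PRECONDITION & SPEC =====
def Spec_bloodsort (blood : String) (out : String) : Prop := out = bloodsort_alt blood
instance (blood : String) (out : String) : Decidable (Spec_bloodsort blood out) := by unfold Spec_bloodsort; infer_instance

-- ===== CLAIM (what is proved, stated in full; the proofs are below) =====
def Claim_equal_bloodsort : Prop := ∀ (blood : String), Dom_bloodsort blood → Spec_bloodsort blood (bloodsort blood)

-- ===== LEMMAS AND PROOFS =====

-- One of A's loops, as long as the running count a can never overshoot n,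
-- appends exactly the matches of t and counts them.
theorem bsLoop_eq (t : Char) (n : Nat) (cs : List Char) :
    ∀ (a : Nat) (s : List Char), a + cs.count t ≤ n →
      bsLoop t cs n a s = (a + cs.count t, s ++ cs.filter (· == t)) := by
  induction cs with
  | nil => intro a s _; simp [bsLoop]
  | cons c rest ih =>
    intro a s h
    by_cases hc : c = t
    · subst hc
      simp only [List.count_cons_self] at h
      by_cases hn : a + 1 = n
      · have hz : rest.count c = 0 := by omega
        have hf : rest.filter (· == c) = [] := by
          rw [List.filter_eq_nil_iff]
          intro x hx hbx
          have hxc : x = c := by simpa using hbx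
          subst hxc
          have := List.count_pos_iff.mpr hx
          omega
        simp [bsLoop, hn, hz, hf]
      · have hrec := ih (a + 1) (s ++ [c]) (by omega)
        simp [bsLoop, hn, hrec]
        omega
    · have hbc : (c == t) = false := by simp [hc]
      simp only [List.count_cons, hbc] at h
      by_cases hn : a = n
      · have hz : rest.count t = 0 := by omega
        have hf : rest.filter (· == t) = [] := by
          rw [List.filter_eq_nil_iff]
          intro x hx hbx
          have hxt : x = t := by simpa using hbx
          subst hxt
          have := List.count_pos_iff.mpr hx
          omega
        simp [bsLoop, hbc, hn, hz, hf, List.count_cons]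
      · have hrec := ih a s (by omega)
        simp [bsLoop, hbc, hn, hrec, List.count_cons]

-- The six tracked letters are pairwise distinct, so their counts sum to at most
-- the length of the list.
theorem counts_le_len (l : List Char) :
    l.count 'R' + l.count 'G' + l.count 'B' + l.count 'r' + l.count 'g' + l.count 'b'
      ≤ l.length := by
  induction l with
  | nil => simp
  | cons c l ih =>
    simp only [List.count_cons, List.length_cons]
    split_ifs <;> simp_all <;> omega

theorem filter_eq_replicate_count (l : List Char) (c : Char) :
    l.filter (· == c) = List.replicate (l.count c) c := by
  induction l with
  | nil => simp
  | cons x l ih =>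
    by_cases hx : x = c
    · subst hx; simp [ih, List.replicate_succ]
    · simp [hx, ih]

-- ===== VERDICT (by name: the statement is the Claim_ definition above) =====
theorem bloodsort_spec : Claim_equal_bloodsort := by
  intro blood _
  unfold Spec_bloodsort bloodsort bloodsort_alt
  have hcounts : blood.toList.foldl
      (fun d ch => d.insert ch (d.getD ch 0 + 1)) (PySem.Dict.empty : PySem.Dict Char Int)
      = PySem.Dict.counter blood.toList :=
    PySem.Dict.foldl_insert_getD_add_one_eq_counter blood.toList
  simp only [hcounts, PySem.Dict.getD_counter]
  set l := blood.toList with hl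
  have hle := counts_le_len l
  rw [bsLoop_eq 'R' l.length l 0 [] (by omega)]
  rw [bsLoop_eq 'G' l.length l _ _ (by omega)]
  rw [bsLoop_eq 'B' l.length l _ _ (by omega)]
  rw [bsLoop_eq 'r' l.length l _ _ (by omega)]
  rw [bsLoop_eq 'g' l.length l _ _ (by omega)]
  rw [bsLoop_eq 'b' l.length l _ _ (by omega)]
  have hs : ("RGBrgb".toList) = ['R','G','B','r','g','b'] := rfl
  simp [PySem.List.pyRepeat_singleton, filter_eq_replicate_count, hs,
    List.flatMap_cons, List.flatMap_nil, List.append_assoc]
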